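-- pv_equiv track=rewrite | github.com/Wiolarz/Logic-Circuits | Minimize_by_expansion.py | create_B
-- ===== SOURCE A (Python) =====
-- import copy
--
-- def create_B(data):
--     """
--     Steps "1:, 2:"
--     :param data:
--     :return:
--     """
--     list_of_B = []
--     grid = data[0]
--     R = data[1]
--     for row_id, row in enumerate(grid):
--         # Creating "B(kx, R)" for each row "k"
--         new_R = copy.deepcopy(R)
--         for i, value in enumerate(row):
--             if value == 1:
--                 for new_row in new_R:
--                     for j, new_value in enumerate(new_row):
--                         if i == j:
--                             if new_value == 1:
--                                 new_row[j] = 0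
--                             else:
--                                 new_row[j] = 1
--
--
--         list_of_B.append(new_R)
--     return list_of_B
-- ===== SOURCE B (Python) =====
-- def create_B(data):
--     grid = data[0]
--     R = data[1]
--     # Precompute the fully-flipped copy of R once, shared by all grid rows.
--     flipped = [[0 if v == 1 else 1 for v in Rrow] for Rrow in R]
--     result = []
--     for row in grid:
--         ones = {c for c, bit in enumerate(row) if bit == 1}
--         result.append([[f if c in ones else v
--                         for c, (v, f) in enumerate(zip(Rrow, Frow))]
--                        for Rrow, Frow in zip(R, flipped)])
--     return result
-- ===== Notes on version B (the rewrite author's own statement) =====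
-- stated objective: alternative
-- what changed: Replaces A's deepcopy-then-mutate (one full pass over R per set bit of each grid row) by a staged construction: the fully flipped copy of R is precomputed once and shared, each grid row is turned into a set of its set-bit column indices, and every output matrix is assembled in one pass by selecting each cell from the zipped (original, flipped) pair by set membership.
-- outside the precondition, e.g. on create_B([[[1]]]): A raises IndexError, B raises IndexError
import Mathlib
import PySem

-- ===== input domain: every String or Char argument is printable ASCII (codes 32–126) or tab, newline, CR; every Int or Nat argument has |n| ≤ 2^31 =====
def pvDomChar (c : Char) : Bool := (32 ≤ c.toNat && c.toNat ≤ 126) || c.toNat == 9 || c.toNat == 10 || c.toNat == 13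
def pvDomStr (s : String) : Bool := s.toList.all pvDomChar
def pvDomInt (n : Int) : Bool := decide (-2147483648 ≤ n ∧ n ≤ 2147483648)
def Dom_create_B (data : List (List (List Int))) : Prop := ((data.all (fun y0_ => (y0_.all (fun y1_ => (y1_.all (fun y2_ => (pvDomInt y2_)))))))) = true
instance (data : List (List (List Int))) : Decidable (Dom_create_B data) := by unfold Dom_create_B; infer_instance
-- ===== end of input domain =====

-- B replaces A's per-grid-row deepcopy-then-mutate-per-set-bit by precomputing the fully
-- flipped copy of R ONCE, plus a per-row set of set-bit columns, and selecting each output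
-- cell from (original, flipped) pairs by set membership (simpler staged decomposition).

-- ===== PORT A =====
-- helper shared by both ports: the flip "0 if value == 1 else 1"
def pvFlip (x : Int) : Int := if x = 1 then 0 else 1

-- A's two inner "for new_row in new_R: for j, new_value in enumerate(new_row)" loops for one set bit at column i
def pvFlipCol (i : Int) (new_row : List Int) : List Int :=
  (PySem.List.enumerate new_row 0).map (fun jv =>
    if i = jv.1 then pvFlip jv.2 else jv.2)

-- one step of A's inner loop body: for a set bit at column i, flip column i in every row of new_R
def pvAStep (new_R : List (List Int)) (iv : Int × Int) : List (List Int) :=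
  if iv.2 = 1 then new_R.map (pvFlipCol iv.1) else new_R

-- A's body for one grid row: deepcopy of R, then the per-set-bit mutation passes
def pvAInner (R : List (List Int)) (row : List Int) : List (List Int) :=
  (PySem.List.enumerate row 0).foldl pvAStep R

def create_B (data : List (List (List Int))) : List (List (List Int)) :=
  let grid := (PySem.List.pyGet? data 0).getD []
  let R := (PySem.List.pyGet? data 1).getD []
  (PySem.List.enumerate grid 0).foldl (fun list_of_B p => list_of_B ++ [pvAInner R p.2]) []

-- ===== PORT B =====
-- "ones = {c for c, bit in enumerate(row) if bit == 1}"
def pvOnes (row : List Int) : PySem.Set Int :=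
  PySem.Set.ofList ((PySem.List.enumerate row 0).filterMap (fun p =>
    if p.2 = 1 then some p.1 else none))

def create_B_alt (data : List (List (List Int))) : List (List (List Int)) :=
  let grid := (PySem.List.pyGet? data 0).getD []
  let R := (PySem.List.pyGet? data 1).getD []
  let flipped := R.map (fun Rrow => Rrow.map pvFlip)
  grid.foldl (fun result row =>
    let ones := pvOnes row
    result ++ [(R.zip flipped).map (fun rf =>
      (PySem.List.enumerate (rf.1.zip rf.2) 0).map (fun cp =>
        if PySem.Set.contains ones cp.1 then cp.2.2 else cp.2.1))]) []

-- ===== PRECONDITION & SPEC =====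
-- Pre_ excludes only data with fewer than two elements, on which Python A raises IndexError at data[0]/data[1].
def Pre_create_B (data : List (List (List Int))) : Prop := 2 ≤ data.length
instance (data : List (List (List Int))) : Decidable (Pre_create_B data) := by unfold Pre_create_B; infer_instance
def pvWitness_create_B : List (List (List Int)) := [[[1, 0]], [[0, 1], [1, 1]]]

def Spec_create_B (data : List (List (List Int))) (out : List (List (List Int))) : Prop := out = create_B_alt data
instance (data : List (List (List Int))) (out : List (List (List Int))) : Decidable (Spec_create_B data out) := by unfold Spec_create_B; infer_instance

-- ===== CLAIM (what is proved, stated in full; the proofs are below) =====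
def Claim_equal_create_B : Prop := ∀ (data : List (List (List Int))), Dom_create_B data → Pre_create_B data → Spec_create_B data (create_B data)

-- ===== LEMMAS AND PROOFS =====

-- canonical per-cell form both ports are reduced to
def pvCanon (row : List Int) (Rrow : List Int) : List Int :=
  (PySem.List.enumerate Rrow 0).map (fun cv =>
    if cv.1 < (row.length : Int) ∧ PySem.List.pyGetD row cv.1 0 = 1 then pvFlip cv.2 else cv.2)

-- the transform A's inner loop (started at offset k with the remaining columns `row`) applies to one R row
def pvTr (row : List Int) (k : Int) (nrow : List Int) : List Int :=
  (PySem.List.enumerate nrow 0).map (fun jv =>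
    if k ≤ jv.1 ∧ jv.1 < k + row.length ∧ PySem.List.pyGetD row (jv.1 - k) 0 = 1 then pvFlip jv.2 else jv.2)

lemma pvTr_nil (k : Int) (nrow : List Int) : pvTr [] k nrow = nrow := by
  unfold pvTr
  have : (PySem.List.enumerate nrow 0).map
      (fun jv : Int × Int =>
        if k ≤ jv.1 ∧ jv.1 < k + ([] : List Int).length ∧ PySem.List.pyGetD ([] : List Int) (jv.1 - k) 0 = 1
        then pvFlip jv.2 else jv.2)
      = (PySem.List.enumerate nrow 0).map (fun jv => jv.2) := by
    apply List.map_congr_left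
    intro p _
    have : ¬ (k ≤ p.1 ∧ p.1 < k + ([] : List Int).length ∧ PySem.List.pyGetD ([] : List Int) (p.1 - k) 0 = 1) := by
      rintro ⟨h1, h2, _⟩; simp at h2; omega
    rw [if_neg this]
  rw [this, PySem.List.map_snd_enumerate]

-- per-cell arithmetic shared by the two shift lemmas
lemma pvCell_shift (v : Int) (rest : List Int) (k t : Int) (_ht : 0 ≤ t) (hk : ¬ k = t) :
    (k + 1 ≤ t ∧ t < k + 1 + (rest.length : Int) ∧ PySem.List.pyGetD rest (t - (k + 1)) 0 = 1)
    = (k ≤ t ∧ t < k + ((v :: rest).length : Int) ∧ PySem.List.pyGetD (v :: rest) (t - k) 0 = 1) := by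
  by_cases hin : k + 1 ≤ t ∧ t < k + 1 + (rest.length : Int)
  · have hg : PySem.List.pyGetD rest (t - (k + 1)) 0 = PySem.List.pyGetD (v :: rest) (t - k) 0 := by
      rw [PySem.List.pyGetD_of_nonneg rest 0 (by omega),
          PySem.List.pyGetD_of_nonneg (v :: rest) 0 (by omega)]
      have h1 : (t - k).toNat = (t - (k + 1)).toNat + 1 := by omega
      rw [h1, List.getD_cons_succ]
    simp only [eq_iff_iff]
    constructor
    · rintro ⟨a, b, c⟩; exact ⟨by omega, by simp; omega, by rw [← hg]; exact c⟩
    · rintro ⟨a, b, c⟩; exact ⟨hin.1, hin.2, by rw [hg]; exact c⟩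
  · have hin' : ¬ (k ≤ t ∧ t < k + ((v :: rest).length : Int)) := by
      rintro ⟨a, b⟩; simp at b; exact hin ⟨by omega, by omega⟩
    simp only [eq_iff_iff]
    constructor
    · rintro ⟨a, b, _⟩; exact absurd ⟨a, b⟩ hin
    · rintro ⟨a, b, _⟩; exact absurd ⟨a, b⟩ hin'

-- shift lemma, set bit: composing A's single-column flip at column k with the transform for the rest
lemma pvTr_cons_one (rest : List Int) (k : Int) (nrow : List Int) :
    pvTr rest (k + 1) (pvFlipCol k nrow) = pvTr (1 :: rest) k nrow := by
  unfold pvTr pvFlipCol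
  apply List.ext_getElem
  · simp [PySem.List.length_enumerate]
  · intro t h1 h2
    simp only [List.getElem_map, PySem.List.getElem_enumerate, PySem.List.length_enumerate,
      List.length_map] at h1 h2 ⊢
    by_cases hk : k = (0 : Int) + t
    · have hc1 : ¬ (k + 1 ≤ (0:Int) + t ∧ ((0:Int) + t) < k + 1 + (rest.length : Int) ∧
          PySem.List.pyGetD rest ((0:Int) + t - (k + 1)) 0 = 1) := by
        rintro ⟨ha, _, _⟩; omega
      have hget : PySem.List.pyGetD (1 :: rest) ((0:Int) + t - k) 0 = 1 := by
        have h0 : (0:Int) + t - k = 0 := by omega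
        rw [h0, PySem.List.pyGetD_zero]; rfl
      rw [if_neg hc1, if_pos hk,
        if_pos ⟨by omega, by simp; omega, hget⟩]
    · rw [if_neg hk]
      simp only [pvCell_shift 1 rest k ((0:Int) + t) (by omega) (by omega)]

-- shift lemma, clear bit: a column whose grid value is not 1 flips nothing
lemma pvTr_cons_ne (v : Int) (rest : List Int) (k : Int) (nrow : List Int) (hv : v ≠ 1) :
    pvTr rest (k + 1) nrow = pvTr (v :: rest) k nrow := by
  unfold pvTr
  apply List.map_congr_left
  intro p hp
  rw [PySem.List.mem_enumerate_iff] at hp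
  obtain ⟨t, ht, rfl⟩ := hp
  by_cases hk : k = (0 : Int) + t
  · have hc1 : ¬ (k + 1 ≤ (0:Int) + t ∧ ((0:Int) + t) < k + 1 + (rest.length : Int) ∧
        PySem.List.pyGetD rest ((0:Int) + t - (k + 1)) 0 = 1) := by
      rintro ⟨ha, _, _⟩; omega
    have hc2 : ¬ ((k ≤ (0:Int) + t) ∧ ((0:Int) + t) < k + ((v :: rest).length : Int) ∧
        PySem.List.pyGetD (v :: rest) ((0:Int) + t - k) 0 = 1) := by
      rintro ⟨_, _, hg⟩
      have h0 : (0:Int) + t - k = 0 := by omega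
      rw [h0, PySem.List.pyGetD_zero] at hg
      exact hv hg
    rw [if_neg hc1, if_neg hc2]
  · simp only [pvCell_shift v rest k ((0:Int) + t) (by omega) (by omega)]

lemma pvA_loop (row : List Int) (k : Int) (acc : List (List Int)) :
    (PySem.List.enumerate row k).foldl pvAStep acc = acc.map (pvTr row k) := by
  induction row generalizing k acc with
  | nil =>
    simp only [PySem.List.enumerate, List.foldl_nil]
    have : acc.map (pvTr [] k) = acc.map id := by
      apply List.map_congr_left; intro x _; rw [pvTr_nil]; rfl
    simp [this]
  | cons v rest ih =>
    rw [PySem.List.enumerate_cons, List.foldl_cons, ih]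
    by_cases hv : v = 1
    · subst hv
      show ((if (1 : Int) = 1 then acc.map (pvFlipCol k) else acc)).map (pvTr rest (k + 1))
          = acc.map (pvTr (1 :: rest) k)
      rw [if_pos rfl, List.map_map]
      apply List.map_congr_left
      intro nrow _
      exact pvTr_cons_one rest k nrow
    · show ((if v = 1 then acc.map (pvFlipCol k) else acc)).map (pvTr rest (k + 1))
          = acc.map (pvTr (v :: rest) k)
      rw [if_neg hv]
      apply List.map_congr_left
      intro nrow _
      exact pvTr_cons_ne v rest k nrow hv

-- A's per-row result is the canonical per-cell form
lemma pvAInner_eq (R : List (List Int)) (row : List Int) :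
    pvAInner R row = R.map (pvCanon row) := by
  unfold pvAInner
  rw [pvA_loop]
  apply List.map_congr_left
  intro Rrow _
  unfold pvTr pvCanon
  apply List.map_congr_left
  intro p hp
  rw [PySem.List.mem_enumerate_iff] at hp
  obtain ⟨t, ht, rfl⟩ := hp
  have h0 : (0:Int) + t - 0 = (0:Int) + t := by omega
  by_cases hc : ((0:Int) + t) < (row.length : Int) ∧ PySem.List.pyGetD row ((0:Int) + t) 0 = 1
  · rw [if_pos ⟨by omega, by omega, by rw [h0]; exact hc.2⟩, if_pos hc]
  · rw [if_neg (by rintro ⟨a, b, c⟩; rw [h0] at c; exact hc ⟨by omega, c⟩), if_neg hc]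

-- membership in B's set of set-bit columns, for a nonnegative column index
lemma pvOnes_contains (row : List Int) (c : Int) (hc : 0 ≤ c) :
    PySem.Set.contains (pvOnes row) c = true
      ↔ (c < (row.length : Int) ∧ PySem.List.pyGetD row c 0 = 1) := by
  rw [PySem.Set.contains_iff]
  unfold pvOnes
  rw [PySem.Set.mem_ofList, List.mem_filterMap]
  constructor
  · rintro ⟨p, hp, hf⟩
    rw [PySem.List.mem_enumerate_iff] at hp
    obtain ⟨k, hk, rfl⟩ := hp
    by_cases h1 : row[k] = 1
    · rw [if_pos h1, Option.some_inj] at hf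
      subst hf
      refine ⟨by simp; omega, ?_⟩
      show PySem.List.pyGetD row ((0:Int) + k) 0 = 1
      rw [zero_add, PySem.List.pyGetD_natCast, List.getD_eq_getElem _ _ hk]
      exact h1
    · rw [if_neg h1] at hf; exact absurd hf (by simp)
  · rintro ⟨hlt, hget⟩
    refine ⟨(c, row[c.toNat]'(by omega)), ?_, ?_⟩
    · rw [PySem.List.mem_enumerate_iff]
      exact ⟨c.toNat, by omega, by congr 1; simp; omega⟩
    · have : row[c.toNat]'(by omega) = 1 := by
        rw [PySem.List.pyGetD_eq_getElem _ _ hc (by omega)] at hget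
        exact hget
      rw [if_pos this]

-- B's per-row matrix (built from (original, flipped) zips and the ones set) is the canonical form
lemma pvBInner_eq (R : List (List Int)) (row : List Int) :
    (R.zip (R.map (fun Rrow => Rrow.map pvFlip))).map (fun rf =>
      (PySem.List.enumerate (rf.1.zip rf.2) 0).map (fun cp =>
        if PySem.Set.contains (pvOnes row) cp.1 then cp.2.2 else cp.2.1))
    = R.map (pvCanon row) := by
  have hz : R.zip (R.map (fun Rrow => Rrow.map pvFlip))
      = R.map (fun Rrow => (Rrow, Rrow.map pvFlip)) := by
    induction R with
    | nil => rfl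
    | cons r rs ih => simpa using ih
  rw [hz, List.map_map]
  apply List.map_congr_left
  intro Rrow hR
  clear hR
  show (PySem.List.enumerate (Rrow.zip (Rrow.map pvFlip)) 0).map (fun cp =>
      if PySem.Set.contains (pvOnes row) cp.1 then cp.2.2 else cp.2.1) = pvCanon row Rrow
  have hz2 : Rrow.zip (Rrow.map pvFlip) = Rrow.map (fun v => (v, pvFlip v)) := by
    induction Rrow with
    | nil => rfl
    | cons v vs ih => simpa using ih
  rw [hz2]
  unfold pvCanon
  apply List.ext_getElem
  · simp [PySem.List.length_enumerate]
  · intro t h1 h2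
    simp only [List.getElem_map, PySem.List.getElem_enumerate, PySem.List.length_enumerate,
      List.length_map] at h1 h2 ⊢
    by_cases hc : ((0:Int) + t) < (row.length : Int) ∧ PySem.List.pyGetD row ((0:Int) + t) 0 = 1
    · rw [if_pos ((pvOnes_contains row _ (by omega)).mpr hc), if_pos hc]
    · rw [if_neg (by
        intro h
        exact hc ((pvOnes_contains row _ (by omega)).mp h)), if_neg hc]

-- ===== VERDICT (by name: the statement is the Claim_ definition above) =====
theorem create_B_spec : Claim_equal_create_B := by
  intro data _ _
  unfold Spec_create_B create_B create_B_alt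
  rw [PySem.List.foldl_append_singleton_eq_map, List.nil_append,
      PySem.List.foldl_append_singleton_eq_map, List.nil_append]
  have : (PySem.List.enumerate ((PySem.List.pyGet? data 0).getD []) 0).map
      (fun p => pvAInner ((PySem.List.pyGet? data 1).getD []) p.2)
      = (((PySem.List.enumerate ((PySem.List.pyGet? data 0).getD []) 0)).map (fun p => p.2)).map
        (pvAInner ((PySem.List.pyGet? data 1).getD [])) := by
    rw [List.map_map]; rfl
  rw [this, PySem.List.map_snd_enumerate]
  apply List.map_congr_left
  intro row _
  rw [pvAInner_eq, pvBInner_eq]
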